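-- pv_equiv track=rewrite | github.com/otniel55/siscong2 | secretario/views/siscong.py | arraymeses
-- ===== SOURCE A (Python) =====
-- def arraymeses(year):
--      meses=[]
--      mes=8
--      meses.append([year, mes])
--      for i in range(1, 12):
--           mes-=1
--           if mes==0:
--                mes=12
--                year-=1
--           meses.append([year,mes])
--      return meses
-- ===== SOURCE B (Python) =====
-- def arraymeses(year):
--     return [[year + (7 - i) // 12, (7 - i) % 12 + 1] for i in range(12)]
-- ===== Notes on version B (the rewrite author's own statement) =====
-- stated objective: simpler
-- what changed: Replaced the stateful decrement loop with a carry/wrap branch by a one-line comprehension computing each [year,month] pair independently from its index via floor-division/mod.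
import Mathlib
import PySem

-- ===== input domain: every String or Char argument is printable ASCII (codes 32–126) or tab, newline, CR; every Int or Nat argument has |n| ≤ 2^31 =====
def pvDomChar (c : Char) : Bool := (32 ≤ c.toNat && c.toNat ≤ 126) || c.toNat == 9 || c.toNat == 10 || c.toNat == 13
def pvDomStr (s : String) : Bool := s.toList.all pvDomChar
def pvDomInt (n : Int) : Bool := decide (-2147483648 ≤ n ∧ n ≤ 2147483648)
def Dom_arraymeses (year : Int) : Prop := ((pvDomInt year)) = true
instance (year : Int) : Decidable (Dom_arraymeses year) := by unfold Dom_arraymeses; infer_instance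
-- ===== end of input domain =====

-- B replaces A's stateful carry/wrap loop with index-based divmod arithmetic (simpler).


-- ===== PORT A =====
def arraymeses (year : Int) : List (List Int) :=
  -- meses=[[year,8]]; loop over range(1,12) carrying (year, mes, meses)
  let st := (PySem.List.pyRange 1 12 1).foldl
    (fun (st : Int × Int × List (List Int)) _ =>
      let (yr, mes, meses) := st
      let mes := mes - 1
      let (yr, mes) := if mes == 0 then (yr - 1, (12 : Int)) else (yr, mes)
      (yr, mes, meses ++ [[yr, mes]]))
    (year, 8, [[year, 8]])
  st.2.2

-- ===== PORT B =====
def arraymeses_alt (year : Int) : List (List Int) :=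
  (PySem.List.pyRange 0 12 1).map
    (fun i => [year + PySem.Int.floordiv (7 - i) 12, PySem.Int.mod (7 - i) 12 + 1])

-- ===== PRECONDITION & SPEC =====
def Spec_arraymeses (year : Int) (out : List (List Int)) : Prop := out = arraymeses_alt year
instance (year : Int) (out : List (List Int)) : Decidable (Spec_arraymeses year out) := by unfold Spec_arraymeses; infer_instance

-- ===== CLAIM (what is proved, stated in full; the proofs are below) =====
def Claim_equal_arraymeses : Prop := ∀ (year : Int), Dom_arraymeses year → Spec_arraymeses year (arraymeses year)

-- ===== LEMMAS AND PROOFS =====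

-- ===== VERDICT (by name: the statement is the Claim_ definition above) =====
theorem arraymeses_spec : Claim_equal_arraymeses := by
  intro year _
  unfold Spec_arraymeses arraymeses arraymeses_alt
  simp [PySem.List.pyRange, PySem.Int.floordiv, PySem.Int.mod, List.range_succ]
  ring_nf
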